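-- pv_equiv track=rewrite | github.com/dylanlap98/agent-breadcrumbs | agent_breadcrumbs/integrations/langchain.py | _parse_flat_prompt_to_structured
-- ===== SOURCE A (Python) =====
-- from typing import Dict, List, Any, Optional
--
-- def _parse_flat_prompt_to_structured(prompt_text: str) -> Dict[str, Any]:
--     """Parse a flat prompt string into structured format"""
--     structured = {}
--
--     parts = prompt_text.split("\n")
--     current_role = None
--     current_content = []
--
--     for part in parts:
--         part = part.strip()
--         if not part:
--             continue
--
--         if part.startswith("System:"):
--             if current_role and current_content:
--                 structured[current_role] = "\n".join(current_content).strip()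
--             current_role = "system"
--             current_content = [part[7:].strip()]  # Remove "System:"
--         elif part.startswith("Human:"):
--             if current_role and current_content:
--                 structured[current_role] = "\n".join(current_content).strip()
--             current_role = "human"
--             current_content = [part[6:].strip()]  # Remove "Human:"
--         elif part.startswith("AI:"):
--             if current_role and current_content:
--                 structured[current_role] = "\n".join(current_content).strip()
--             current_role = "ai"
--             current_content = [part[3:].strip()]  # Remove "AI:"
--         elif part.startswith("Tool:"):
--             if current_role and current_content:
--                 structured[current_role] = "\n".join(current_content).strip()
--             current_role = "tool"
--             current_content = [part[5:].strip()]  # Remove "Tool:"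
--         else:
--             if current_content:
--                 current_content.append(part)
--             else:
--                 current_role = "human"
--                 current_content = [part]
--
--     if current_role and current_content:
--         structured[current_role] = "\n".join(current_content).strip()
--
--     return structured
-- ===== SOURCE B (Python) =====
-- _MARKERS = (("System:", "system"), ("Human:", "human"), ("AI:", "ai"), ("Tool:", "tool"))
--
--
-- def _match(line):
--     """Return (role, remainder) if line starts with a role marker, else None."""
--     for prefix, role in _MARKERS:
--         if line.startswith(prefix):
--             return (role, line[len(prefix):].strip())
--     return None
--
--
-- def _parse_flat_prompt_to_structured(prompt_text: str):
--     """Parse a flat prompt string into structured format.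
--
--     Single backwards pass: scanning the cleaned lines from the end, marker-free
--     lines pile up as the body of whatever marker line will be met next; each
--     marker line emits one finished (role, text) segment.  Leftover body lines
--     (text before any marker) form a "human" segment.  Segments come out
--     back-to-front, so reverse once, and dict() does the last-wins overwrite.
--     """
--     lines = [line.strip() for line in prompt_text.split("\n") if line.strip()]
--     segments = []
--     body = []
--     for line in reversed(lines):
--         m = _match(line)
--         if m is None:
--             body.append(line)
--         else:
--             role, first = m
--             segments.append((role, "\n".join([first] + body[::-1]).strip()))
--             body = []
--     if body:
--         segments.append(("human", "\n".join(body[::-1]).strip()))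
--     segments.reverse()
--     return dict(segments)
-- ===== Notes on version B (the rewrite author's own statement) =====
-- stated objective: alternative
-- what changed: A makes one forward pass threading a (dict, current_role, current_content) state and flushing into the dict at every marker; B cleans the lines, then scans them BACKWARDS with no role state - marker-free lines pile up as the body of the next marker line seen, each marker line emits a finished (role, text) segment back-to-front, leftover lines become a human-role segment - reverses the segment list once and builds the dict in one shot with dict(segments).
import Mathlib
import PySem

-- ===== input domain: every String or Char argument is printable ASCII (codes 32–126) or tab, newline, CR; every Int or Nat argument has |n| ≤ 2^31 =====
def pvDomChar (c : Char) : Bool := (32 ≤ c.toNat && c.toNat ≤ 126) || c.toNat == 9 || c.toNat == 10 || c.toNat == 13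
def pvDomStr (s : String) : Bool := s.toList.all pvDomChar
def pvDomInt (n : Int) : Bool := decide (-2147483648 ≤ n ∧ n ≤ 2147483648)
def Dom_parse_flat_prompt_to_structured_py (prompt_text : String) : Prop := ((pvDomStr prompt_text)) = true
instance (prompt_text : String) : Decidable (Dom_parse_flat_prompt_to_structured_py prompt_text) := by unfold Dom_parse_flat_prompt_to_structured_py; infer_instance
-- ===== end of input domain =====

-- B replaces A's forward loop over a (dict, current_role, current_content) state by a clean-lines
-- pass, a BACKWARDS scan that emits finished (role, text) segments back-to-front (no role state;
-- one _match helper), one reverse, and a final dict(segments); objective: alternative.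

-- s.split("\n"); sep is the non-empty literal "\n", so split? is always some
def pvSplitNL (s : String) : List String := (PySem.Str.split? s "\n").getD []

-- ===== PORT A =====
-- flush: 'if current_role and current_content: structured[current_role] = "\n".join(current_content).strip()'
def pvA_flush (structured : PySem.Dict String String) (role? : Option String) (content : List String) :
    PySem.Dict String String :=
  match role? with
  | some r =>
      if r ≠ "" ∧ content ≠ [] then
        structured.insert r (PySem.Str.strip (PySem.Str.join "\n" content))
      else structured
  | none => structured

-- one iteration of A's 'for part in parts' loop over the state (structured, current_role, current_content)
def pvA_step (st : PySem.Dict String String × Option String × List String) (part0 : String) :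
    PySem.Dict String String × Option String × List String :=
  let part := PySem.Str.strip part0
  if part = "" then st
  else if PySem.Str.startswith part "System:" then
    (pvA_flush st.1 st.2.1 st.2.2, some "system", [PySem.Str.strip (PySem.Str.slice part (some 7) none)])
  else if PySem.Str.startswith part "Human:" then
    (pvA_flush st.1 st.2.1 st.2.2, some "human", [PySem.Str.strip (PySem.Str.slice part (some 6) none)])
  else if PySem.Str.startswith part "AI:" then
    (pvA_flush st.1 st.2.1 st.2.2, some "ai", [PySem.Str.strip (PySem.Str.slice part (some 3) none)])
  else if PySem.Str.startswith part "Tool:" then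
    (pvA_flush st.1 st.2.1 st.2.2, some "tool", [PySem.Str.strip (PySem.Str.slice part (some 5) none)])
  else if st.2.2 ≠ [] then (st.1, st.2.1, st.2.2 ++ [part])
  else (st.1, some "human", [part])

-- the final 'if current_role and current_content' flush after the loop
def pvA_finish (st : PySem.Dict String String × Option String × List String) : PySem.Dict String String :=
  pvA_flush st.1 st.2.1 st.2.2

def parse_flat_prompt_to_structured_py (prompt_text : String) : List (String × String) :=
  (pvA_finish ((pvSplitNL prompt_text).foldl pvA_step (PySem.Dict.empty, none, []))).items

-- ===== PORT B =====
def pvMarkers : List (String × String) :=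
  [("System:", "system"), ("Human:", "human"), ("AI:", "ai"), ("Tool:", "tool")]

-- _match: 'for prefix, role in _MARKERS: if line.startswith(prefix): return (role, line[len(prefix):].strip()); return None'
def pvMatchGo : List (String × String) → String → Option (String × String)
  | [], _ => none
  | (p, r) :: ms, line =>
      if PySem.Str.startswith line p then
        some (r, PySem.Str.strip (PySem.Str.slice line (some (PySem.Str.len p)) none))
      else pvMatchGo ms line

def pvMatch (line : String) : Option (String × String) := pvMatchGo pvMarkers line

-- one step of B's 'for line in reversed(lines)' loop over the state (segments, body)
def pvB_step (st : List (String × String) × List String) (line : String) :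
    List (String × String) × List String :=
  match pvMatch line with
  | none => (st.1, st.2 ++ [line])
  | some m =>
      (st.1 ++ [(m.1, PySem.Str.strip (PySem.Str.join "\n" (m.2 :: st.2.reverse)))], [])

-- 'lines = [line.strip() for line in prompt_text.split("\n") if line.strip()]'
def pvClean (ls : List String) : List String :=
  (ls.filter (fun l => PySem.Str.strip l ≠ "")).map PySem.Str.strip

-- backwards scan, leftover-body flush, one reverse, then 'dict(segments)'
def parse_flat_prompt_to_structured_py_alt (prompt_text : String) : List (String × String) :=
  let lines := pvClean (pvSplitNL prompt_text)
  let st := lines.reverse.foldl pvB_step ([], [])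
  let segments :=
    if st.2 ≠ [] then st.1 ++ [("human", PySem.Str.strip (PySem.Str.join "\n" st.2.reverse))]
    else st.1
  (segments.reverse.foldl (fun d p => d.insert p.1 p.2) PySem.Dict.empty).items

-- ===== PRECONDITION & SPEC =====
def Spec_parse_flat_prompt_to_structured_py (prompt_text : String) (out : List (String × String)) : Prop := out = parse_flat_prompt_to_structured_py_alt prompt_text
instance (prompt_text : String) (out : List (String × String)) : Decidable (Spec_parse_flat_prompt_to_structured_py prompt_text out) := by unfold Spec_parse_flat_prompt_to_structured_py; infer_instance

-- ===== CLAIM (what is proved, stated in full; the proofs are below) =====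
def Claim_equal_parse_flat_prompt_to_structured_py : Prop := ∀ (prompt_text : String), Dom_parse_flat_prompt_to_structured_py prompt_text → Spec_parse_flat_prompt_to_structured_py prompt_text (parse_flat_prompt_to_structured_py prompt_text)

-- ===== LEMMAS AND PROOFS =====

-- proof-side helpers: the forward segment view of the lines
def pvSpan : List String → List String × List String
  | [] => ([], [])
  | l :: rest =>
      if (pvMatch l).isNone then
        let br := pvSpan rest
        (l :: br.1, br.2)
      else ([], l :: rest)

theorem pvSpan_snd_length_le (ls : List String) : (pvSpan ls).2.length ≤ ls.length := by
  induction ls with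
  | nil => simp [pvSpan]
  | cons l rest ih =>
    simp only [pvSpan]
    split
    · exact Nat.le_succ_of_le ih
    · simp

def pvSegs : List String → List (String × String)
  | [] => []
  | l :: rest =>
      let rf := match pvMatch l with | none => ("human", l) | some m => m
      let br := pvSpan rest
      (rf.1, PySem.Str.strip (PySem.Str.join "\n" (rf.2 :: br.1))) :: pvSegs br.2
  termination_by ls => ls.length
  decreasing_by simpa using Nat.lt_succ_of_le (pvSpan_snd_length_le rest)

-- strip is idempotent
theorem pv_dw_idem (p : Char → Bool) (l : List Char) :
    List.dropWhile p (List.dropWhile p l) = List.dropWhile p l := by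
  cases h : List.dropWhile p l with
  | nil => simp
  | cons a t =>
    have := List.head_dropWhile_not p (l := l) (by simp [h])
    simp [h] at this
    simp [this]

theorem pv_rstrip_prefix (l : List Char) : PySem.Chars.rstrip l <+: l := by
  unfold PySem.Chars.rstrip
  rw [← List.reverse_reverse l]
  exact (List.reverse_prefix).mpr
    (by simpa using List.dropWhile_suffix (l := l.reverse) PySem.Chars.isspace)

theorem pv_rstrip_idem (l : List Char) :
    PySem.Chars.rstrip (PySem.Chars.rstrip l) = PySem.Chars.rstrip l := by
  unfold PySem.Chars.rstrip
  rw [List.reverse_reverse, pv_dw_idem]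

theorem pv_lstrip_of_head (l : List Char) (h : PySem.Chars.lstrip l ≠ []) :
    PySem.Chars.lstrip (PySem.Chars.rstrip (PySem.Chars.lstrip l)) = PySem.Chars.rstrip (PySem.Chars.lstrip l) := by
  cases hr : PySem.Chars.rstrip (PySem.Chars.lstrip l) with
  | nil => simp [PySem.Chars.lstrip]
  | cons a t =>
    have hpre := pv_rstrip_prefix (PySem.Chars.lstrip l)
    rw [hr] at hpre
    obtain ⟨u, hu⟩ := hpre
    have hsp := List.head_dropWhile_not PySem.Chars.isspace (l := l)
      (by simpa [PySem.Chars.lstrip] using h)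
    have hhead : PySem.Chars.isspace a = false := by
      unfold PySem.Chars.lstrip at hu
      cases hl : List.dropWhile PySem.Chars.isspace l with
      | nil => simp [PySem.Chars.lstrip, hl] at h
      | cons b s =>
        rw [hl] at hu
        simp at hu
        rw [hu.1]
        simpa [hl] using hsp
    simp [PySem.Chars.lstrip, hhead]

theorem pv_strip_idem (l : List Char) :
    PySem.Chars.strip (PySem.Chars.strip l) = PySem.Chars.strip l := by
  unfold PySem.Chars.strip
  by_cases h : PySem.Chars.lstrip l = []
  · unfold PySem.Chars.lstrip at h
    unfold PySem.Chars.rstrip PySem.Chars.lstrip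
    rw [h]; simp
  · rw [pv_lstrip_of_head l h, pv_rstrip_idem]

theorem pv_str_strip_idem (s : String) :
    PySem.Str.strip (PySem.Str.strip s) = PySem.Str.strip s := by
  simp [PySem.Str.strip, pv_strip_idem]

-- A's fold sees only the cleaned lines
theorem pvA_step_strip (st : PySem.Dict String String × Option String × List String) (l : String) :
    pvA_step st (PySem.Str.strip l) = pvA_step st l := by
  simp only [pvA_step, pv_str_strip_idem]

theorem pvA_step_empty (st : PySem.Dict String String × Option String × List String) (l : String)
    (h : PySem.Str.strip l = "") : pvA_step st l = st := by
  simp [pvA_step, h]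

theorem pvA_fold_clean (ls : List String) :
    ∀ st, ls.foldl pvA_step st = (pvClean ls).foldl pvA_step st := by
  induction ls with
  | nil => intro st; rfl
  | cons l t ih =>
    intro st
    by_cases h : PySem.Str.strip l = ""
    · rw [show pvClean (l :: t) = pvClean t by simp [pvClean, h]]
      rw [List.foldl_cons, pvA_step_empty st l h]
      exact ih st
    · rw [show pvClean (l :: t) = PySem.Str.strip l :: pvClean t by simp [pvClean, h]]
      rw [List.foldl_cons, List.foldl_cons, pvA_step_strip st l]
      exact ih _

-- main invariant: from an open segment (r, c), A's loop over cleaned lines equals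
-- flushing (r, c ++ body-span) and then inserting B's remaining segments
theorem pvMainSeg (ls : List String) :
    (∀ l ∈ ls, PySem.Str.strip l = l ∧ l ≠ "") →
    ∀ (d : PySem.Dict String String) (r : String) (c : List String), r ≠ "" → c ≠ [] →
      pvA_finish (ls.foldl pvA_step (d, some r, c)) =
        List.foldl (fun d p => d.insert p.1 p.2)
          (d.insert r (PySem.Str.strip (PySem.Str.join "\n" (c ++ (pvSpan ls).1))))
          (pvSegs (pvSpan ls).2) := by
  induction ls with
  | nil =>
    intro _ d r c hr hc
    simp [pvA_finish, pvA_flush, hr, hc, pvSpan, pvSegs]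
  | cons l t ih =>
    intro hcl d r c hr hc
    obtain ⟨hsl, hne⟩ := hcl l (by simp)
    have ihc := fun x hx => hcl x (List.mem_cons_of_mem l hx)
    rw [List.foldl_cons]
    have key : ∀ (rk : String) (x : String), rk ≠ "" →
        pvA_step (d, some r, c) l
          = (d.insert r (PySem.Str.strip (PySem.Str.join "\n" c)), some rk, [x]) →
        pvMatch l = some (rk, x) →
        pvA_finish (List.foldl pvA_step (pvA_step (d, some r, c) l) t) =
          List.foldl (fun d p => d.insert p.1 p.2)
            (d.insert r (PySem.Str.strip (PySem.Str.join "\n" (c ++ (pvSpan (l :: t)).1))))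
            (pvSegs (pvSpan (l :: t)).2) := by
      intro rk x hrk hA hM
      rw [hA, ih ihc _ rk [x] hrk (by simp)]
      rw [show pvSpan (l :: t) = ([], l :: t) by simp [pvSpan, hM]]
      rw [show pvSegs (l :: t)
            = (rk, PySem.Str.strip (PySem.Str.join "\n" (x :: (pvSpan t).1))) :: pvSegs (pvSpan t).2 by
          rw [pvSegs]; simp [hM]]
      simp
    by_cases h1 : PySem.Chars.startswith l.toList ['S','y','s','t','e','m',':'] = true
    · exact key "system" (PySem.Str.strip (PySem.Str.slice l (some 7) none)) (by simp)
        (by simp [pvA_step, hsl, hne, h1, pvA_flush, hr, hc])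
        (by simp [pvMatch, pvMatchGo, pvMarkers, h1, PySem.Str.len])
    · by_cases h2 : PySem.Chars.startswith l.toList ['H','u','m','a','n',':'] = true
      · exact key "human" (PySem.Str.strip (PySem.Str.slice l (some 6) none)) (by simp)
          (by simp [pvA_step, hsl, hne, h1, h2, pvA_flush, hr, hc])
          (by simp [pvMatch, pvMatchGo, pvMarkers, h1, h2, PySem.Str.len])
      · by_cases h3 : PySem.Chars.startswith l.toList ['A','I',':'] = true
        · exact key "ai" (PySem.Str.strip (PySem.Str.slice l (some 3) none)) (by simp)
            (by simp [pvA_step, hsl, hne, h1, h2, h3, pvA_flush, hr, hc])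
            (by simp [pvMatch, pvMatchGo, pvMarkers, h1, h2, h3, PySem.Str.len])
        · by_cases h4 : PySem.Chars.startswith l.toList ['T','o','o','l',':'] = true
          · exact key "tool" (PySem.Str.strip (PySem.Str.slice l (some 5) none)) (by simp)
              (by simp [pvA_step, hsl, hne, h1, h2, h3, h4, pvA_flush, hr, hc])
              (by simp [pvMatch, pvMatchGo, pvMarkers, h1, h2, h3, h4, PySem.Str.len])
          · have hM : pvMatch l = none := by
              simp [pvMatch, pvMatchGo, pvMarkers, h1, h2, h3, h4]
            rw [show pvA_step (d, some r, c) l = (d, some r, c ++ [l]) by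
                  simp [pvA_step, hsl, hne, h1, h2, h3, h4, hc]]
            rw [ih ihc d r (c ++ [l]) hr (by simp)]
            rw [show pvSpan (l :: t) = (l :: (pvSpan t).1, (pvSpan t).2) by simp [pvSpan, hM]]
            simp

theorem pvTopSeg (ls : List String) (hcl : ∀ l ∈ ls, PySem.Str.strip l = l ∧ l ≠ "") :
    pvA_finish (ls.foldl pvA_step (PySem.Dict.empty, none, [])) =
      List.foldl (fun d p => d.insert p.1 p.2) PySem.Dict.empty (pvSegs ls) := by
  cases ls with
  | nil => simp [pvA_finish, pvA_flush, pvSegs]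
  | cons l t =>
    obtain ⟨hsl, hne⟩ := hcl l (by simp)
    have hclt := fun x hx => hcl x (List.mem_cons_of_mem l hx)
    rw [List.foldl_cons]
    have key : ∀ (rk : String) (x : String), rk ≠ "" →
        pvA_step (PySem.Dict.empty, none, []) l = (PySem.Dict.empty, some rk, [x]) →
        (match pvMatch l with | none => ("human", l) | some m => m) = (rk, x) →
        pvA_finish (List.foldl pvA_step (pvA_step (PySem.Dict.empty, none, []) l) t) =
          List.foldl (fun d p => d.insert p.1 p.2) PySem.Dict.empty (pvSegs (l :: t)) := by
      intro rk x hrk hA hM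
      rw [hA, pvMainSeg t hclt PySem.Dict.empty rk [x] hrk (by simp)]
      rw [show pvSegs (l :: t)
            = (rk, PySem.Str.strip (PySem.Str.join "\n" (x :: (pvSpan t).1))) :: pvSegs (pvSpan t).2 by
          rw [pvSegs]; rw [hM]]
      simp
    by_cases h1 : PySem.Chars.startswith l.toList ['S','y','s','t','e','m',':'] = true
    · exact key "system" (PySem.Str.strip (PySem.Str.slice l (some 7) none)) (by simp)
        (by simp [pvA_step, hsl, hne, h1, pvA_flush])
        (by simp [pvMatch, pvMatchGo, pvMarkers, h1, PySem.Str.len])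
    · by_cases h2 : PySem.Chars.startswith l.toList ['H','u','m','a','n',':'] = true
      · exact key "human" (PySem.Str.strip (PySem.Str.slice l (some 6) none)) (by simp)
          (by simp [pvA_step, hsl, hne, h1, h2, pvA_flush])
          (by simp [pvMatch, pvMatchGo, pvMarkers, h1, h2, PySem.Str.len])
      · by_cases h3 : PySem.Chars.startswith l.toList ['A','I',':'] = true
        · exact key "ai" (PySem.Str.strip (PySem.Str.slice l (some 3) none)) (by simp)
            (by simp [pvA_step, hsl, hne, h1, h2, h3, pvA_flush])
            (by simp [pvMatch, pvMatchGo, pvMarkers, h1, h2, h3, PySem.Str.len])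
        · by_cases h4 : PySem.Chars.startswith l.toList ['T','o','o','l',':'] = true
          · exact key "tool" (PySem.Str.strip (PySem.Str.slice l (some 5) none)) (by simp)
              (by simp [pvA_step, hsl, hne, h1, h2, h3, h4, pvA_flush])
              (by simp [pvMatch, pvMatchGo, pvMarkers, h1, h2, h3, h4, PySem.Str.len])
          · exact key "human" l (by simp)
              (by simp [pvA_step, hsl, hne, h1, h2, h3, h4])
              (by simp [pvMatch, pvMatchGo, pvMarkers, h1, h2, h3, h4])

theorem pvClean_clean (ls : List String) :
    ∀ l ∈ pvClean ls, PySem.Str.strip l = l ∧ l ≠ "" := by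
  intro l hl
  simp [pvClean] at hl
  obtain ⟨x, hx, rfl⟩ := hl
  exact ⟨pv_str_strip_idem x, hx.2⟩


-- B's backwards fold computes pvSegs of the pending span, reversed
theorem pvRevFold (lines : List String) :
    lines.reverse.foldl pvB_step ([], []) =
      ((pvSegs ((pvSpan lines).2)).reverse, ((pvSpan lines).1).reverse) := by
  rw [List.foldl_reverse]
  induction lines with
  | nil => simp [pvSpan, pvSegs]
  | cons l t ih =>
    rw [List.foldr_cons, ih]
    cases hM : pvMatch l with
    | none =>
      rw [show pvSpan (l :: t) = (l :: (pvSpan t).1, (pvSpan t).2) by simp [pvSpan, hM]]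
      simp [pvB_step, hM]
    | some m =>
      rw [show pvSpan (l :: t) = ([], l :: t) by simp [pvSpan, hM]]
      rw [show pvSegs (l :: t)
            = (m.1, PySem.Str.strip (PySem.Str.join "\n" (m.2 :: (pvSpan t).1))) :: pvSegs (pvSpan t).2 by
          rw [pvSegs]; rw [hM]]
      simp [pvB_step, hM]

theorem pvSpan_fst_nil (ls : List String) (h : (pvSpan ls).1 = []) : (pvSpan ls).2 = ls := by
  cases ls with
  | nil => rfl
  | cons l t =>
    by_cases hM : (pvMatch l).isNone
    · simp [pvSpan, hM] at h
    · simp [pvSpan, hM]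

-- the leftover-body flush plus the final reverse yields exactly pvSegs
theorem pvFinal (lines : List String) :
    (let st := lines.reverse.foldl pvB_step ([], []);
     (if st.2 ≠ [] then st.1 ++ [("human", PySem.Str.strip (PySem.Str.join "\n" st.2.reverse))]
      else st.1).reverse) = pvSegs lines := by
  rw [pvRevFold]
  by_cases h : (pvSpan lines).1 = []
  · simp [h, pvSpan_fst_nil lines h]
  · cases hl : lines with
    | nil => rw [hl] at h; simp [pvSpan] at h
    | cons l t =>
      rw [hl] at h
      have hM : (pvMatch l).isNone := by
        by_contra hM
        simp only [pvSpan] at h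
        rw [if_neg hM] at h
        simp at h
      have hsp : pvSpan (l :: t) = (l :: (pvSpan t).1, (pvSpan t).2) := by
        simp [pvSpan, hM]
      have hMn : pvMatch l = none := by
        cases hx : pvMatch l with
        | none => rfl
        | some m => rw [hx] at hM; simp at hM
      rw [show pvSegs (l :: t)
            = ("human", PySem.Str.strip (PySem.Str.join "\n" (l :: (pvSpan t).1))) :: pvSegs (pvSpan t).2 by
          rw [pvSegs]; rw [hMn]]
      rw [hsp]
      simp

-- ===== VERDICT (by name: the statement is the Claim_ definition above) =====
theorem parse_flat_prompt_to_structured_py_spec : Claim_equal_parse_flat_prompt_to_structured_py := by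
  intro prompt_text _
  unfold Spec_parse_flat_prompt_to_structured_py parse_flat_prompt_to_structured_py
    parse_flat_prompt_to_structured_py_alt
  rw [pvA_fold_clean, pvTopSeg _ (pvClean_clean _)]
  exact congrArg
    (fun segs => (List.foldl (fun d p => d.insert p.1 p.2) PySem.Dict.empty segs).items)
    (pvFinal (pvClean (pvSplitNL prompt_text))).symm
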